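-- pv_equiv track=rewrite | github.com/Alec-xdu/An-experiment-of-SCE | 实验3.py | intPrimeCheck
-- ===== SOURCE A (Python) =====
-- from math import gcd, prod
--
-- def intPrimeCheck(inputList: list, inputNum: int) -> bool:
-- 	flag = True
-- 	listSize = len(inputList)
-- 	for i in range(0, listSize):
-- 		if gcd(inputList[i], inputNum) != 1:
-- 			flag = False
-- 			break
-- 	return flag
-- ===== SOURCE B (Python) =====
-- from math import gcd, prod
--
-- def intPrimeCheck(inputList: list, inputNum: int) -> bool:
-- 	return gcd(prod(inputList), inputNum) == 1
-- ===== Notes on version B (the rewrite author's own statement) =====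
-- stated objective: alternative
-- what changed: Replaces the per-element early-exit loop with one aggregate: B multiplies all elements (prod, 1 for empty) and tests coprimality with a single gcd call, relying on gcd(prod xs, n)=1 iff gcd(x,n)=1 for all x.
import Mathlib
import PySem

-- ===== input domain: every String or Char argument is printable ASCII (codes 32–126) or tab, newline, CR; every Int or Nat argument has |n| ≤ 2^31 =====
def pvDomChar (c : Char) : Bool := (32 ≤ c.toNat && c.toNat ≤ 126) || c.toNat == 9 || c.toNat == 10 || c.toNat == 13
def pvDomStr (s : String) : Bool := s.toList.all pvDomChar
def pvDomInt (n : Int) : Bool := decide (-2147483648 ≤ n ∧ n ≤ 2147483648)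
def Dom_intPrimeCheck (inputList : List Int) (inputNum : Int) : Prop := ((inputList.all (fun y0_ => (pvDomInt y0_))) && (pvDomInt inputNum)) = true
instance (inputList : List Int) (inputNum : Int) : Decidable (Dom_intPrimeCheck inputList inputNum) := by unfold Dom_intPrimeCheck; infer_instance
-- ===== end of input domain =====

-- B replaces the per-element early-exit loop by one product and a single gcd (same cost class; alternative decomposition).
-- ===== PORT A =====
-- the 'for i in range(0, listSize): if gcd(...)!=1: flag=False; break' loop; returning false models the break
def intPrimeCheckLoopA (inputList : List Int) (inputNum : Int) : List Int → Bool
  | [] => true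
  | i :: rest =>
      if Int.gcd ((PySem.List.pyGet? inputList i).getD 0) inputNum ≠ 1 then false
      else intPrimeCheckLoopA inputList inputNum rest

def intPrimeCheck (inputList : List Int) (inputNum : Int) : Bool :=
  intPrimeCheckLoopA inputList inputNum (PySem.List.pyRange 0 inputList.length 1)

-- ===== PORT B =====
def intPrimeCheck_alt (inputList : List Int) (inputNum : Int) : Bool :=
  Int.gcd (inputList.foldl (· * ·) 1) inputNum == 1

-- ===== PRECONDITION & SPEC =====
def Spec_intPrimeCheck (inputList : List Int) (inputNum : Int) (out : Bool) : Prop := out = intPrimeCheck_alt inputList inputNum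
instance (inputList : List Int) (inputNum : Int) (out : Bool) : Decidable (Spec_intPrimeCheck inputList inputNum out) := by unfold Spec_intPrimeCheck; infer_instance

-- ===== CLAIM (what is proved, stated in full; the proofs are below) =====
def Claim_equal_intPrimeCheck : Prop := ∀ (inputList : List Int) (inputNum : Int), Dom_intPrimeCheck inputList inputNum → Spec_intPrimeCheck inputList inputNum (intPrimeCheck inputList inputNum)

-- ===== LEMMAS AND PROOFS =====

-- ===== VERDICT below at bottom =====


theorem gcd_prod_eq_one (xs : List Int) (n : Int) :
    (Int.gcd (xs.foldl (· * ·) 1) n = 1) ↔ ∀ x ∈ xs, Int.gcd x n = 1 := by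
  rw [show xs.foldl (· * ·) 1 = xs.prod from List.prod_eq_foldl.symm]
  induction xs with
  | nil => simp [Int.gcd]
  | cons x xs ih =>
      simp only [List.prod_cons, List.mem_cons, forall_eq_or_imp, ← ih]
      show Nat.Coprime _ _ ↔ _
      rw [Int.natAbs_mul, Nat.coprime_mul_iff_left]
      exact Iff.rfl

theorem loopA_eq_all (xs : List Int) (n : Int) (l : List Int) :
    intPrimeCheckLoopA xs n l
      = l.all (fun i => Int.gcd ((PySem.List.pyGet? xs i).getD 0) n == 1) := by
  induction l with
  | nil => rfl
  | cons i rest ih =>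
      simp only [intPrimeCheckLoopA, List.all_cons, ih]
      split_ifs with h
      · simp [h]
      · simp at h; simp [h]

theorem intPrimeCheck_spec : Claim_equal_intPrimeCheck := by
  intro xs n _
  unfold Spec_intPrimeCheck intPrimeCheck intPrimeCheck_alt
  rw [loopA_eq_all]
  rcases Bool.eq_false_or_eq_true (Int.gcd (xs.foldl (· * ·) 1) n == 1) with hb | hb <;> rw [hb]
  · rw [List.all_eq_true]
    have h := (gcd_prod_eq_one xs n).mp (by simpa using hb)
    intro i hi
    rw [PySem.List.mem_pyRange_one] at hi
    have hlt : i.toNat < xs.length := by omega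
    have hcast : i = ((i.toNat : Nat) : Int) := by omega
    rw [hcast]
    simp only [PySem.List.pyGet?_natCast, List.getElem?_eq_getElem hlt, Option.getD_some]
    simpa using h _ (List.getElem_mem hlt)
  · rw [List.all_eq_false]
    have h := (not_iff_not.mpr (gcd_prod_eq_one xs n)).mp (by simpa using hb)
    push_neg at h
    obtain ⟨x, hx, hxne⟩ := h
    obtain ⟨k, hk, hget⟩ := List.mem_iff_getElem.mp hx
    refine ⟨(k : Int), ?_, ?_⟩
    · rw [PySem.List.mem_pyRange_one]; constructor <;> omega
    · simp [PySem.List.pyGet?_natCast, hk, hget, hxne]
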